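-- pv_equiv track=rewrite | github.com/npl22/projecteuler | euler_02.py | solution_i
-- ===== SOURCE A (Python) =====
-- def solution_i(a_n: int) -> int:
--     """Calculate the sum of all the even fibonacci numbers."""
--     fibonacci = [1, 2]
--     i = 2
--     j = 0
--     last_number = 0
--     result = 2
--     while last_number < a_n:
--         if j == fibonacci[i-1] + fibonacci[i-2]:
--             fibonacci.append(fibonacci[i-1] + fibonacci[i-2])
--             last_number = fibonacci[i]
--             if fibonacci[i] % 2 == 0:
--                 result += fibonacci[i]
--             i += 1
--         j += 1
--
--     return result
-- ===== SOURCE B (Python) =====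
-- def solution_i(a_n: int) -> int:
--     """Calculate the sum of all the even fibonacci numbers."""
--     a, b = 1, 2
--     result = 2
--     while b < a_n:
--         a, b = b, a + b
--         if b % 2 == 0:
--             result += b
--     return result
-- ===== Notes on version B (the rewrite author's own statement) =====
-- stated objective: faster
-- what changed: A finds each next Fibonacci number by incrementing a counter j one unit at a time until it equals fib[i-1]+fib[i-2] (and keeps the whole list); B generates the Fibonacci numbers directly with the two-register recurrence a, b = b, a+b, summing the even ones.
import Mathlib
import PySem

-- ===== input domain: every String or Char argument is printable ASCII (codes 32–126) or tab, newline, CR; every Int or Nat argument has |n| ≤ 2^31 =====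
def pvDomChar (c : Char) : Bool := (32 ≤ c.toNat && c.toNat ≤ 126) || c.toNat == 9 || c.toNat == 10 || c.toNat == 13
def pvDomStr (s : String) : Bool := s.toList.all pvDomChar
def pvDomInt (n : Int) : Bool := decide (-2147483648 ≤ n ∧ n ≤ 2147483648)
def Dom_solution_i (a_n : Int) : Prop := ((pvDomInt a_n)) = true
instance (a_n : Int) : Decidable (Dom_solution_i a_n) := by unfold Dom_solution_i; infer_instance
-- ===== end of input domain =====

-- B replaces A's unit-step counter (j is incremented one by one until it hits the next
-- Fibonacci number) by the direct Fibonacci recurrence, summing even terms: O(log a_n)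
-- iterations instead of O(a_n).

-- ===== PORT A =====
-- fibonacci[i-1] + fibonacci[i-2] (the next Fibonacci number A is counting towards)
def pvTgt (fib : List Int) (i : Int) : Int :=
  (PySem.List.pyGet? fib (i - 1)).getD 0 + (PySem.List.pyGet? fib (i - 2)).getD 0

-- loop invariant of A's while loop, carried so the recursion is well-founded
def pvInvA (fib : List Int) (i j last : Int) : Prop :=
  ∃ pre a b, fib = pre ++ [a, b] ∧ i = (fib.length : Int) ∧ 0 < a ∧ 0 < b ∧
    last < a + b ∧ j ≤ a + b

-- cited by the port's proof obligations: the indices i-1, i-2 hit the last two elements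
lemma pvTgt_eq (pre : List Int) (a b i : Int)
    (hi : i = (((pre ++ [a, b]).length : Nat) : Int)) : pvTgt (pre ++ [a, b]) i = a + b := by
  subst hi
  have h1 : (((pre ++ [a, b]).length : Nat) : Int) - 1 = ((pre.length + 1 : Nat) : Int) := by
    simp; ring
  have h2 : (((pre ++ [a, b]).length : Nat) : Int) - 2 = ((pre.length : Nat) : Int) := by
    simp
  unfold pvTgt
  rw [h1, h2, PySem.List.pyGet?_natCast, PySem.List.pyGet?_natCast]
  rw [List.getElem?_append_right (by omega), List.getElem?_append_right (by omega)]
  norm_num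
  ring

-- cited by the port: fibonacci[i] right after the append is the appended element
lemma pvGet_append (fib : List Int) (t i : Int) (hi : i = ((fib.length : Nat) : Int)) :
    PySem.List.pyGet? (fib ++ [t]) i = some t := by
  subst hi; rw [PySem.List.pyGet?_natCast]; simp

-- A's while loop, step for step (getD 0 is exact: the invariant keeps every index in range)
def solution_i_loopA (a_n : Int) (fib : List Int) (i j last result : Int)
    (inv : pvInvA fib i j last) : Int :=
  if hlt : last < a_n then
    if hj : j = pvTgt fib i then
      solution_i_loopA a_n
        (fib ++ [pvTgt fib i])                                              -- fibonacci.append(...)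
        (i + 1) (j + 1)
        ((PySem.List.pyGet? (fib ++ [pvTgt fib i]) i).getD 0)               -- last_number = fibonacci[i]
        (if PySem.Int.mod ((PySem.List.pyGet? (fib ++ [pvTgt fib i]) i).getD 0) 2 = 0
          then result + (PySem.List.pyGet? (fib ++ [pvTgt fib i]) i).getD 0 else result)
        (by
          obtain ⟨pre, a, b, hfib, hi, ha, hb, hlast, hjle⟩ := inv
          have ht : pvTgt fib i = a + b := by subst hfib; exact pvTgt_eq pre a b i hi
          have hg : PySem.List.pyGet? (fib ++ [pvTgt fib i]) i = some (pvTgt fib i) :=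
            pvGet_append _ _ _ hi
          refine ⟨pre ++ [a], b, pvTgt fib i, ?_, ?_, hb, by omega, ?_, ?_⟩
          · subst hfib; simp
          · simp [hi]
          · rw [hg]; simp; omega
          · omega)
    else
      solution_i_loopA a_n fib i (j + 1) last result
        (by
          obtain ⟨pre, a, b, hfib, hi, ha, hb, hlast, hjle⟩ := inv
          have ht : pvTgt fib i = a + b := by subst hfib; exact pvTgt_eq pre a b i hi
          exact ⟨pre, a, b, hfib, hi, ha, hb, hlast, by omega⟩)
  else result
termination_by ((a_n - last).toNat, (pvTgt fib i - j).toNat)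
decreasing_by
  · obtain ⟨pre, a, b, hfib, hi, ha, hb, hlast, hjle⟩ := inv
    have ht : pvTgt fib i = a + b := by subst hfib; exact pvTgt_eq pre a b i hi
    have hg : PySem.List.pyGet? (fib ++ [pvTgt fib i]) i = some (pvTgt fib i) :=
      pvGet_append _ _ _ hi
    apply Prod.Lex.left
    rw [hg]; simp; omega
  · obtain ⟨pre, a, b, hfib, hi, ha, hb, hlast, hjle⟩ := inv
    have ht : pvTgt fib i = a + b := by subst hfib; exact pvTgt_eq pre a b i hi
    apply Prod.Lex.right
    omega

def solution_i (a_n : Int) : Int :=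
  solution_i_loopA a_n [1, 2] 2 0 0 2
    ⟨[], 1, 2, rfl, by norm_num, by norm_num, by norm_num, by norm_num, by norm_num⟩

-- ===== PORT B =====
-- B's while loop: a, b = b, a + b; add the new b when even
def solution_i_alt_loop (a_n a b result : Int) (ha : 0 < a) (hb : 0 < b) : Int :=
  if h : b < a_n then
    solution_i_alt_loop a_n b (a + b)
      (if PySem.Int.mod (a + b) 2 = 0 then result + (a + b) else result) hb (by omega)
  else result
termination_by (a_n - b).toNat
decreasing_by omega

def solution_i_alt (a_n : Int) : Int :=
  solution_i_alt_loop a_n 1 2 2 (by norm_num) (by norm_num)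

-- ===== PRECONDITION & SPEC =====
def Spec_solution_i (a_n : Int) (out : Int) : Prop := out = solution_i_alt a_n
instance (a_n : Int) (out : Int) : Decidable (Spec_solution_i a_n out) := by unfold Spec_solution_i; infer_instance

-- ===== CLAIM (what is proved, stated in full; the proofs are below) =====
def Claim_equal_solution_i : Prop := ∀ (a_n : Int), Dom_solution_i a_n → Spec_solution_i a_n (solution_i a_n)

-- ===== LEMMAS AND PROOFS =====

-- A's loop with the unit counting collapsed: keeps only the last two Fibonacci numbers
def pvAbsA (a_n a b last result : Int) (ha : 0 < a) (hb : 0 < b) (hl : last < a + b) : Int :=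
  if last < a_n then
    pvAbsA a_n b (a + b) (a + b)
      (if PySem.Int.mod (a + b) 2 = 0 then result + (a + b) else result) hb (by omega) (by omega)
  else result
termination_by (a_n - last).toNat
decreasing_by omega

-- loopA's arguments may be replaced by equal ones (the invariant proof is irrelevant)
lemma pvLoopA_congr (a_n : Int) {fib1 fib2 : List Int} {i1 i2 j1 j2 l1 l2 r1 r2 : Int}
    (h1 : fib1 = fib2) (h2 : i1 = i2) (h3 : j1 = j2) (h4 : l1 = l2) (h5 : r1 = r2)
    (inv1 : pvInvA fib1 i1 j1 l1) (inv2 : pvInvA fib2 i2 j2 l2) :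
    solution_i_loopA a_n fib1 i1 j1 l1 r1 inv1 = solution_i_loopA a_n fib2 i2 j2 l2 r2 inv2 := by
  subst h1 h2 h3 h4 h5; rfl

-- A's unit counting collapsed: the concrete loop equals the abstract two-register loop
lemma pvL1 (a_n : Int) (fib pre : List Int) (a b i j last result : Int)
    (hfib : fib = pre ++ [a, b]) (hi : i = ((fib.length : Nat) : Int))
    (ha : 0 < a) (hb : 0 < b) (hlast : last < a + b) (hjle : j ≤ a + b)
    (inv : pvInvA fib i j last) :
    solution_i_loopA a_n fib i j last result inv = pvAbsA a_n a b last result ha hb hlast := by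
  have ht : pvTgt fib i = a + b := by subst hfib; exact pvTgt_eq pre a b i hi
  by_cases hlt : last < a_n
  · by_cases hjeq : j = pvTgt fib i
    · rw [solution_i_loopA, dif_pos hlt, dif_pos hjeq]
      have hg := pvGet_append fib (pvTgt fib i) i hi
      have inv' : pvInvA (fib ++ [a + b]) (i + 1) (j + 1) (a + b) :=
        ⟨pre ++ [a], b, a + b, by rw [hfib]; simp, by subst hi; push_cast [List.length_append, List.length_cons, List.length_nil]; try omega
          , hb, by omega, by omega, by omega⟩
      refine (pvLoopA_congr a_n (r2 := if PySem.Int.mod (a + b) 2 = 0 then result + (a + b) else result)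
          ?_ rfl rfl ?_ ?_ _ inv').trans ?_
      · rw [ht]
      · rw [hg, Option.getD_some, ht]
      · rw [hg, Option.getD_some, ht]
      conv_rhs => rw [pvAbsA]
      rw [if_pos hlt]
      exact pvL1 a_n (fib ++ [a + b]) (pre ++ [a]) b (a + b) (i + 1) (j + 1) (a + b) _
        (by rw [hfib]; simp) (by subst hi; push_cast [List.length_append, List.length_cons, List.length_nil]; try omega) hb (by omega) (by omega) (by omega) inv'
    · rw [solution_i_loopA, dif_pos hlt, dif_neg hjeq]
      exact pvL1 a_n fib pre a b i (j + 1) last result hfib hi ha hb hlast (by omega) _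
  · rw [solution_i_loopA, pvAbsA, dif_neg hlt, if_neg hlt]
termination_by ((a_n - last).toNat, (pvTgt fib i - j).toNat)
decreasing_by
  all_goals first
  | (apply Prod.Lex.left; omega)
  | (apply Prod.Lex.right; omega)

lemma pvL2 (a_n : Int) (n : ℕ) :
    ∀ (a b result : Int) (ha : 0 < a) (hb : 0 < b) (hl : b < a + b),
      (a_n - b).toNat ≤ n →
      pvAbsA a_n a b b result ha hb hl = solution_i_alt_loop a_n a b result ha hb := by
  induction n with
  | zero =>
    intro a b result ha hb hl hn
    rw [pvAbsA, solution_i_alt_loop, if_neg (by omega), dif_neg (by omega)]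
  | succ n ih =>
    intro a b result ha hb hl hn
    rw [pvAbsA, solution_i_alt_loop]
    by_cases h : b < a_n
    · rw [if_pos h, dif_pos h]
      exact ih b (a + b) _ hb (by omega) (by omega) (by omega)
    · rw [if_neg h, dif_neg h]

-- ===== VERDICT (by name: the statement is the Claim_ definition above) =====
theorem solution_i_spec : Claim_equal_solution_i := by
  intro a_n _
  show solution_i a_n = solution_i_alt a_n
  unfold solution_i solution_i_alt
  rw [pvL1 a_n [1, 2] [] 1 2 2 0 0 2 rfl (by norm_num) (by norm_num) (by norm_num)
      (by norm_num) (by norm_num)]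
  rw [pvAbsA, solution_i_alt_loop]
  have h3 : PySem.Int.mod (1 + 2) 2 = 1 := by decide
  by_cases h2 : 2 < a_n
  · rw [if_pos (by omega), dif_pos h2, h3]
    norm_num
    rw [pvL2 a_n (a_n - (1 + 2)).toNat 2 3 2 (by norm_num) (by norm_num) (by norm_num) le_rfl]
  · by_cases h0 : 0 < a_n
    · rw [if_pos h0, dif_neg h2, h3]
      norm_num
      rw [pvAbsA, if_neg (by omega)]
    · rw [if_neg (by omega), dif_neg (by omega)]
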